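-- pv_equiv track=rewrite | github.com/Mjkim-Programming/PS | geometry/conv_query.py | getArcUnion
-- ===== SOURCE A (Python) =====
-- def getArcUnion(R1,L1,R2,L2,n):
--     def get_intervals(R,L,n):
--         if (R+1)%n == L: return []
--         res=[]
--         s,e=(R+1)%n,(L-1+n)%n
--         if s<=e: res.append((s,e))
--         else:
--             res.append((s,n-1))
--             res.append((0,e))
--         return res
--     intervals=sorted(get_intervals(R1,L1,n)+get_intervals(R2,L2,n))
--     if not intervals: return 0
--     total_rem=0
--     cur_s,cur_e=intervals[0]
--     for i in range(1,len(intervals)):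
--         ns,ne=intervals[i]
--         if ns<=cur_e+1:
--             cur_e=max(cur_e,ne)
--         else:
--             total_rem+=(cur_e-cur_s+1)
--             cur_s,cur_e=ns,ne
--     total_rem+=(cur_e-cur_s+1)
--     return total_rem
-- ===== SOURCE B (Python) =====
-- def getArcUnion(R1, L1, R2, L2, n):
--     # Inclusion-exclusion on the (at most two) linear segments of each
--     # complement arc: |C1| + |C2| - |C1 ∩ C2|, no sorting, no sweep.
--     def segs(R, L):
--         if (R + 1) % n == L:
--             return []
--         s, e = (R + 1) % n, (L - 1 + n) % n
--         return [(s, e)] if s <= e else [(s, n - 1), (0, e)]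
--     segs1, segs2 = segs(R1, L1), segs(R2, L2)
--     size1 = sum(e - s + 1 for s, e in segs1)
--     size2 = sum(e - s + 1 for s, e in segs2)
--     overlap = sum(max(0, min(e1, e2) - max(s1, s2) + 1)
--                   for s1, e1 in segs1 for s2, e2 in segs2)
--     return size1 + size2 - overlap
-- ===== Notes on version B (the rewrite author's own statement) =====
-- stated objective: simpler
-- what changed: Replaces A's sort-and-sweep interval merge by direct inclusion-exclusion over the at-most-two linear segments of each arc complement (|C1|+|C2|-|C1 inter C2|), eliminating the sort and the merge loop.
-- outside the precondition, e.g. on getArcUnion(-14, -3, -9, 15, -4): A returns 2, B returns -3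
import Mathlib
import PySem

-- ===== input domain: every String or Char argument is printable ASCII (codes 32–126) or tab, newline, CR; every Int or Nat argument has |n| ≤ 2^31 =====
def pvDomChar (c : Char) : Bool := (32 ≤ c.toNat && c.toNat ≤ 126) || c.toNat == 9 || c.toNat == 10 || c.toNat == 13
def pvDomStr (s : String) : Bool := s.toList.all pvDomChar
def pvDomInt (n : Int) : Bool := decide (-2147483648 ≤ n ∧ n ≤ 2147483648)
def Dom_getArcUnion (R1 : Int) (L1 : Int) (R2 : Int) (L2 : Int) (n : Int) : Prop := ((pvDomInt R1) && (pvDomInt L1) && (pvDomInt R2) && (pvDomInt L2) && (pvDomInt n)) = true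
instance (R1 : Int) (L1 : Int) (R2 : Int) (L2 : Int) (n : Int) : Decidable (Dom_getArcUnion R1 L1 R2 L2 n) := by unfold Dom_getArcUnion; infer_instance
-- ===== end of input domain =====

-- B replaces A's sort-and-sweep interval merge by inclusion–exclusion on the (≤ 2) linear
-- segments of each arc complement: |C1| + |C2| - |C1 ∩ C2|, no sorting, no sweep (objective: simpler).

-- ===== PORT A =====
-- A's inner helper get_intervals(R, L, n)
def pvGetIntervalsA (R : Int) (L : Int) (n : Int) : List (Int × Int) :=
  if PySem.Int.mod (R + 1) n = L then []
  else
    let s := PySem.Int.mod (R + 1) n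
    let e := PySem.Int.mod (L - 1 + n) n
    if s ≤ e then [(s, e)] else [(s, n - 1), (0, e)]

-- the body of A's merge loop (state = (total_rem, cur_s, cur_e))
def pvSweepStep (acc : Int × Int × Int) (p : Int × Int) : Int × Int × Int :=
  if p.1 ≤ acc.2.2 + 1 then (acc.1, acc.2.1, max acc.2.2 p.2)
  else (acc.1 + (acc.2.2 - acc.2.1 + 1), p.1, p.2)

def getArcUnion (R1 : Int) (L1 : Int) (R2 : Int) (L2 : Int) (n : Int) : Int :=
  let intervals := PySem.List.sorted2 (pvGetIntervalsA R1 L1 n ++ pvGetIntervalsA R2 L2 n)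
      (fun p => p.1) (fun p => p.2)
  match intervals with
  | [] => 0
  | (s0, e0) :: rest =>
      let st := rest.foldl pvSweepStep (0, s0, e0)
      st.1 + (st.2.2 - st.2.1 + 1)

-- ===== PORT B =====
-- B's inner helper segs(R, L)
def pvSegsB (R : Int) (L : Int) (n : Int) : List (Int × Int) :=
  if PySem.Int.mod (R + 1) n = L then []
  else
    let s := PySem.Int.mod (R + 1) n
    let e := PySem.Int.mod (L - 1 + n) n
    if s ≤ e then [(s, e)] else [(s, n - 1), (0, e)]

def getArcUnion_alt (R1 : Int) (L1 : Int) (R2 : Int) (L2 : Int) (n : Int) : Int :=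
  let segs1 := pvSegsB R1 L1 n
  let segs2 := pvSegsB R2 L2 n
  let size1 := (segs1.map (fun p => p.2 - p.1 + 1)).sum
  let size2 := (segs2.map (fun p => p.2 - p.1 + 1)).sum
  let overlap := (segs1.map (fun p =>
      (segs2.map (fun q => max 0 (min p.2 q.2 - max p.1 q.1 + 1))).sum)).sum
  size1 + size2 - overlap

-- ===== PRECONDITION & SPEC =====
-- Pre_ restricts to a positive ring size: for n = 0 the Python A raises ZeroDivisionError, and a
-- negative n is outside the natural domain of a ring of n positions (A then returns meaningless,
-- even negative, "counts").
def Pre_getArcUnion (R1 : Int) (L1 : Int) (R2 : Int) (L2 : Int) (n : Int) : Prop := 0 < n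
instance (R1 : Int) (L1 : Int) (R2 : Int) (L2 : Int) (n : Int) : Decidable (Pre_getArcUnion R1 L1 R2 L2 n) := by unfold Pre_getArcUnion; infer_instance
def pvWitness_getArcUnion : Int × Int × Int × Int × Int := (0, 2, 1, 3, 5)

def Spec_getArcUnion (R1 : Int) (L1 : Int) (R2 : Int) (L2 : Int) (n : Int) (out : Int) : Prop := out = getArcUnion_alt R1 L1 R2 L2 n
instance (R1 : Int) (L1 : Int) (R2 : Int) (L2 : Int) (n : Int) (out : Int) : Decidable (Spec_getArcUnion R1 L1 R2 L2 n out) := by unfold Spec_getArcUnion; infer_instance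

-- ===== CLAIM (what is proved, stated in full; the proofs are below) =====
def Claim_equal_getArcUnion : Prop := ∀ (R1 : Int) (L1 : Int) (R2 : Int) (L2 : Int) (n : Int), Dom_getArcUnion R1 L1 R2 L2 n → Pre_getArcUnion R1 L1 R2 L2 n → Spec_getArcUnion R1 L1 R2 L2 n (getArcUnion R1 L1 R2 L2 n)

-- ===== LEMMAS AND PROOFS =====

-- the set of ring positions covered by a list of (inclusive) intervals
noncomputable def pvIccUnion (l : List (Int × Int)) : Finset Int :=
  l.foldr (fun p acc => Finset.Icc p.1 p.2 ∪ acc) ∅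

theorem pvIccUnion_nil : pvIccUnion [] = ∅ := rfl

theorem pvIccUnion_cons (p : Int × Int) (l : List (Int × Int)) :
    pvIccUnion (p :: l) = Finset.Icc p.1 p.2 ∪ pvIccUnion l := rfl

theorem mem_pvIccUnion {x : Int} {l : List (Int × Int)} :
    x ∈ pvIccUnion l ↔ ∃ p ∈ l, p.1 ≤ x ∧ x ≤ p.2 := by
  induction l with
  | nil => simp [pvIccUnion]
  | cons p l ih => simp [pvIccUnion_cons, ih, Finset.mem_union, Finset.mem_Icc]

theorem pvIccUnion_perm {l l' : List (Int × Int)} (h : l.Perm l') :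
    pvIccUnion l = pvIccUnion l' := by
  ext x
  simp only [mem_pvIccUnion]
  constructor <;> rintro ⟨p, hp, hx⟩ <;> exact ⟨p, by first | exact h.mem_iff.mp hp | exact h.mem_iff.mpr hp, hx⟩

theorem pvIccUnion_append (l m : List (Int × Int)) :
    pvIccUnion (l ++ m) = pvIccUnion l ∪ pvIccUnion m := by
  induction l with
  | nil => simp [pvIccUnion_nil]
  | cons p l ih => simp [pvIccUnion_cons, ih, Finset.union_assoc]

theorem pvIcc_inter_Icc (a b c d : Int) :
    Finset.Icc a b ∩ Finset.Icc c d = Finset.Icc (max a c) (min b d) := by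
  ext x; simp only [Finset.mem_inter, Finset.mem_Icc]; omega

theorem pvDisjoint_pvIccUnion {s e : Int} {l : List (Int × Int)}
    (h : ∀ q ∈ l, Disjoint (Finset.Icc s e) (Finset.Icc q.1 q.2)) :
    Disjoint (Finset.Icc s e) (pvIccUnion l) := by
  rw [Finset.disjoint_left]
  intro x hx hmem
  rcases mem_pvIccUnion.mp hmem with ⟨q, hq, h1, h2⟩
  exact (Finset.disjoint_left.mp (h q hq)) hx (Finset.mem_Icc.mpr ⟨h1, h2⟩)

-- pairwise disjointness of the intervals of one list
def pvPD (l : List (Int × Int)) : Prop :=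
  l.Pairwise (fun p q => Disjoint (Finset.Icc p.1 p.2) (Finset.Icc q.1 q.2))

theorem pv_size_sum (l : List (Int × Int)) (hne : ∀ p ∈ l, p.1 ≤ p.2) (hpd : pvPD l) :
    (l.map (fun p => p.2 - p.1 + 1)).sum = ((pvIccUnion l).card : Int) := by
  induction l with
  | nil => simp [pvIccUnion_nil]
  | cons p l ih =>
      rcases hpd with _ | ⟨hhead, htail⟩
      rw [List.map_cons, List.sum_cons, pvIccUnion_cons,
        Finset.card_union_of_disjoint (pvDisjoint_pvIccUnion hhead),
        ih (fun q hq => hne q (List.mem_cons_of_mem _ hq)) htail]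
      have hp := hne p List.mem_cons_self
      push_cast [Int.card_Icc]
      omega

theorem pv_overlap_inner (s e : Int) (m : List (Int × Int)) (hpd : pvPD m) :
    (m.map (fun q => max 0 (min e q.2 - max s q.1 + 1))).sum =
      (((Finset.Icc s e ∩ pvIccUnion m).card : Int)) := by
  induction m with
  | nil => simp [pvIccUnion_nil]
  | cons q m ih =>
      rcases hpd with _ | ⟨hhead, htail⟩
      rw [List.map_cons, List.sum_cons, pvIccUnion_cons, Finset.inter_union_distrib_left]
      have hdisj : Disjoint (Finset.Icc s e ∩ Finset.Icc q.1 q.2) (Finset.Icc s e ∩ pvIccUnion m) :=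
        Finset.disjoint_of_subset_right Finset.inter_subset_right
          (Finset.disjoint_of_subset_left Finset.inter_subset_right (pvDisjoint_pvIccUnion hhead))
      rw [Finset.card_union_of_disjoint hdisj, ih htail, pvIcc_inter_Icc]
      push_cast [Int.card_Icc]
      omega

theorem pv_overlap_sum (l m : List (Int × Int)) (hl : pvPD l) (hm : pvPD m) :
    (l.map (fun p => (m.map (fun q => max 0 (min p.2 q.2 - max p.1 q.1 + 1))).sum)).sum =
      ((pvIccUnion l ∩ pvIccUnion m).card : Int) := by
  induction l with
  | nil => simp [pvIccUnion_nil]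
  | cons p l ih =>
      rcases hl with _ | ⟨hhead, htail⟩
      rw [List.map_cons, List.sum_cons, pvIccUnion_cons, Finset.union_inter_distrib_right]
      have hdisj : Disjoint (Finset.Icc p.1 p.2 ∩ pvIccUnion m) (pvIccUnion l ∩ pvIccUnion m) :=
        Finset.disjoint_of_subset_right Finset.inter_subset_left
          (Finset.disjoint_of_subset_left Finset.inter_subset_left (pvDisjoint_pvIccUnion hhead))
      rw [Finset.card_union_of_disjoint hdisj, ih htail, pv_overlap_inner p.1 p.2 m hm]
      push_cast
      ring

-- insertion with sorted2's lexicographic `before` keeps the list sorted by first components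
theorem pvInsertBy_pairwise_fst (x : Int × Int) (ys : List (Int × Int))
    (h : ys.Pairwise (fun p q => p.1 ≤ q.1)) :
    (PySem.List.insertBy
        (fun a b => decide (a.1 < b.1) || (!decide (b.1 < a.1) && decide (a.2 < b.2)))
        x ys).Pairwise (fun p q => p.1 ≤ q.1) := by
  induction ys with
  | nil => simp [PySem.List.insertBy]
  | cons y ys ih =>
      rcases h with _ | ⟨hhead, htail⟩
      by_cases hb : (decide (x.1 < y.1) || (!decide (y.1 < x.1) && decide (x.2 < y.2))) = true
      · simp only [PySem.List.insertBy, hb, if_pos]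
        have hxy : x.1 ≤ y.1 := by
          simp only [Bool.or_eq_true, Bool.and_eq_true, Bool.not_eq_true', decide_eq_true_eq,
            decide_eq_false_iff_not] at hb
          omega
        exact List.Pairwise.cons
          (by intro z hz
              rcases List.mem_cons.mp hz with rfl | hz
              · exact hxy
              · exact le_trans hxy (hhead z hz))
          (List.Pairwise.cons hhead htail)
      · simp only [PySem.List.insertBy, hb, if_neg, Bool.false_eq_true, not_false_iff]
        have hyx : y.1 ≤ x.1 := by
          simp only [Bool.or_eq_true, Bool.and_eq_true, Bool.not_eq_true', decide_eq_true_eq,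
            decide_eq_false_iff_not] at hb
          omega
        refine List.Pairwise.cons ?_ (ih htail)
        intro z hz
        rcases List.mem_cons.mp ((PySem.List.insertBy_perm _ x ys).mem_iff.mp hz) with rfl | hz'
        · exact hyx
        · exact hhead z hz'

theorem pvSorted2_pairwise_fst (xs : List (Int × Int)) :
    (PySem.List.sorted2 xs (fun p => p.1) (fun p => p.2)).Pairwise (fun p q => p.1 ≤ q.1) := by
  show (List.foldl _ [] xs).Pairwise _
  have : ∀ (xs acc : List (Int × Int)), acc.Pairwise (fun p q : Int × Int => p.1 ≤ q.1) →
      (List.foldl (fun acc x => PySem.List.insertBy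
        (fun a b => decide (a.1 < b.1) || (!decide (b.1 < a.1) && decide (a.2 < b.2))) x acc)
        acc xs).Pairwise (fun p q : Int × Int => p.1 ≤ q.1) := by
    intro xs
    induction xs with
    | nil => intro acc h; exact h
    | cons x xs ih => intro acc h; exact ih _ (pvInsertBy_pairwise_fst x acc h)
  exact this xs [] List.Pairwise.nil

-- the sweep loop computes the cardinality of the union of a fst-sorted list of nonempty intervals
theorem pvSweep_aux (rest : List (Int × Int)) : ∀ (total cs ce : Int), cs ≤ ce →
    (∀ p ∈ rest, cs ≤ p.1 ∧ p.1 ≤ p.2) → rest.Pairwise (fun p q => p.1 ≤ q.1) →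
    (rest.foldl pvSweepStep (total, cs, ce)).1 +
      ((rest.foldl pvSweepStep (total, cs, ce)).2.2 - (rest.foldl pvSweepStep (total, cs, ce)).2.1 + 1) =
      total + ((pvIccUnion ((cs, ce) :: rest)).card : Int) := by
  induction rest with
  | nil =>
      intro total cs ce hce _ _
      simp only [List.foldl_nil, pvIccUnion_cons, pvIccUnion_nil, Finset.union_empty]
      push_cast [Int.card_Icc]
      omega
  | cons p rest ih =>
      obtain ⟨ps, pe⟩ := p
      intro total cs ce hce hmem hpw
      rcases hpw with _ | ⟨hhead, htail⟩
      obtain ⟨hcp, hpe⟩ := hmem (ps, pe) List.mem_cons_self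
      rw [List.foldl_cons]
      by_cases hmerge : ps ≤ ce + 1
      · have hstep : pvSweepStep (total, cs, ce) (ps, pe) = (total, cs, max ce pe) := by
          simp [pvSweepStep, hmerge]
        rw [hstep, ih total cs (max ce pe) (le_trans hce (le_max_left _ _))
          (fun q hq => ⟨(hmem q (List.mem_cons_of_mem _ hq)).1, (hmem q (List.mem_cons_of_mem _ hq)).2⟩) htail]
        have hset : pvIccUnion ((cs, max ce pe) :: rest) = pvIccUnion ((cs, ce) :: (ps, pe) :: rest) := by
          ext x
          simp only [pvIccUnion_cons, Finset.mem_union, Finset.mem_Icc]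
          by_cases hx : x ∈ pvIccUnion rest
          · simp [hx]
          · simp only [hx, or_false]
            omega
        rw [hset]
      · have hstep : pvSweepStep (total, cs, ce) (ps, pe) = (total + (ce - cs + 1), ps, pe) := by
          simp only [pvSweepStep]
          rw [if_neg hmerge]
        rw [hstep, ih (total + (ce - cs + 1)) ps pe hpe
          (fun q hq => ⟨hhead q hq, (hmem q (List.mem_cons_of_mem _ hq)).2⟩) htail]
        have hdisj : Disjoint (Finset.Icc cs ce) (pvIccUnion ((ps, pe) :: rest)) := by
          rw [Finset.disjoint_left]
          intro x hx hmem'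
          rcases mem_pvIccUnion.mp hmem' with ⟨q, hq, h1, h2⟩
          rcases List.mem_cons.mp hq with rfl | hq
          · rw [Finset.mem_Icc] at hx; omega
          · have := hhead q hq
            rw [Finset.mem_Icc] at hx; omega
        rw [show pvIccUnion ((cs, ce) :: (ps, pe) :: rest) = Finset.Icc cs ce ∪ pvIccUnion ((ps, pe) :: rest) from rfl,
          Finset.card_union_of_disjoint hdisj]
        push_cast [Int.card_Icc]
        omega

-- the three shapes of get_intervals / segs, for 0 < n
theorem pvIntervals_shape (R L n : Int) (hn : 0 < n) :
    (∀ p ∈ pvGetIntervalsA R L n, 0 ≤ p.1 ∧ p.1 ≤ p.2) ∧ pvPD (pvGetIntervalsA R L n) := by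
  simp only [pvGetIntervalsA]
  have hs1 := PySem.Int.mod_nonneg (R + 1) hn
  have hs2 := PySem.Int.mod_lt (R + 1) hn
  have he1 := PySem.Int.mod_nonneg (L - 1 + n) hn
  have he2 := PySem.Int.mod_lt (L - 1 + n) hn
  unfold pvPD
  split_ifs with h1 h2
  · exact ⟨by simp, List.Pairwise.nil⟩
  · refine ⟨?_, List.pairwise_singleton _ _⟩
    intro p hp
    rcases List.mem_cons.mp hp with rfl | hp
    · exact ⟨hs1, h2⟩
    · simp at hp
  · refine ⟨?_, ?_⟩
    · intro p hp
      rcases List.mem_cons.mp hp with rfl | hp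
      · exact ⟨hs1, by omega⟩
      · rcases List.mem_cons.mp hp with rfl | hp
        · exact ⟨le_refl 0, by omega⟩
        · simp at hp
    · refine List.Pairwise.cons ?_ (List.pairwise_singleton _ _)
      intro q hq
      rcases List.mem_cons.mp hq with rfl | hq
      · rw [Finset.disjoint_left]
        intro x hx hx'
        rw [Finset.mem_Icc] at hx hx'
        omega
      · simp at hq

theorem pvSegsB_eq (R L n : Int) : pvSegsB R L n = pvGetIntervalsA R L n := rfl

-- B computes |union| by inclusion–exclusion
theorem pvAlt_eq_card (R1 L1 R2 L2 n : Int) (hn : 0 < n) :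
    getArcUnion_alt R1 L1 R2 L2 n =
      ((pvIccUnion (pvGetIntervalsA R1 L1 n) ∪ pvIccUnion (pvGetIntervalsA R2 L2 n)).card : Int) := by
  obtain ⟨hne1, hpd1⟩ := pvIntervals_shape R1 L1 n hn
  obtain ⟨hne2, hpd2⟩ := pvIntervals_shape R2 L2 n hn
  simp only [getArcUnion_alt, pvSegsB_eq]
  rw [
    pv_size_sum _ (fun p hp => (hne1 p hp).2) hpd1,
    pv_size_sum _ (fun p hp => (hne2 p hp).2) hpd2,
    pv_overlap_sum _ _ hpd1 hpd2]
  have := Finset.card_union_add_card_inter (pvIccUnion (pvGetIntervalsA R1 L1 n))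
    (pvIccUnion (pvGetIntervalsA R2 L2 n))
  omega

-- A computes |union| by sort-and-sweep
theorem pvA_eq_card (R1 L1 R2 L2 n : Int) (hn : 0 < n) :
    getArcUnion R1 L1 R2 L2 n =
      ((pvIccUnion (pvGetIntervalsA R1 L1 n) ∪ pvIccUnion (pvGetIntervalsA R2 L2 n)).card : Int) := by
  obtain ⟨hne1, _⟩ := pvIntervals_shape R1 L1 n hn
  obtain ⟨hne2, _⟩ := pvIntervals_shape R2 L2 n hn
  simp only [getArcUnion]
  have hperm := PySem.List.sorted2_perm (pvGetIntervalsA R1 L1 n ++ pvGetIntervalsA R2 L2 n)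
    (fun p : Int × Int => p.1) (fun p : Int × Int => p.2) false
  have hpw := pvSorted2_pairwise_fst (pvGetIntervalsA R1 L1 n ++ pvGetIntervalsA R2 L2 n)
  have hcard : pvIccUnion (PySem.List.sorted2 (pvGetIntervalsA R1 L1 n ++ pvGetIntervalsA R2 L2 n)
      (fun p => p.1) (fun p => p.2)) =
      pvIccUnion (pvGetIntervalsA R1 L1 n) ∪ pvIccUnion (pvGetIntervalsA R2 L2 n) := by
    rw [pvIccUnion_perm hperm, pvIccUnion_append]
  have hne : ∀ p ∈ PySem.List.sorted2 (pvGetIntervalsA R1 L1 n ++ pvGetIntervalsA R2 L2 n)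
      (fun p : Int × Int => p.1) (fun p : Int × Int => p.2), p.1 ≤ p.2 := by
    intro p hp
    rcases List.mem_append.mp (hperm.mem_iff.mp hp) with h | h
    · exact (hne1 p h).2
    · exact (hne2 p h).2
  rcases hsort : PySem.List.sorted2 (pvGetIntervalsA R1 L1 n ++ pvGetIntervalsA R2 L2 n)
      (fun p : Int × Int => p.1) (fun p : Int × Int => p.2) with _ | ⟨⟨s0, e0⟩, rest⟩
  · rw [← hcard, hsort]
    simp [pvIccUnion_nil]
  · rw [hsort] at hcard hpw hne
    rcases hpw with _ | ⟨hhead, htail⟩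
    have := pvSweep_aux rest 0 s0 e0 (hne (s0, e0) List.mem_cons_self)
      (fun q hq => ⟨hhead q hq, hne q (List.mem_cons_of_mem _ hq)⟩) htail
    simp only at this ⊢
    rw [this, ← hcard]
    simp

-- ===== VERDICT (by name: the statement is the Claim_ definition above) =====
theorem getArcUnion_spec : Claim_equal_getArcUnion := by
  intro R1 L1 R2 L2 n _ hn
  unfold Spec_getArcUnion
  rw [pvA_eq_card R1 L1 R2 L2 n hn, pvAlt_eq_card R1 L1 R2 L2 n hn]
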